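-- pv_equiv track=rewrite | github.com/AkashChand6n/DEV_ops | Python/008_nth_smallest_largest.py | nth_largest
-- ===== SOURCE A (Python) =====
-- def nth_largest(nums, n): # function to find nth largest number
--     for i in range(n):  # loop to find nth largest number
--         max_num = nums[0]
--         for num in nums:
--             if num > max_num:
--                 max_num = num
--         nums.remove(max_num)
--     return max_num
-- ===== SOURCE B (Python) =====
-- def nth_largest(nums, n):
--     return sorted(nums, reverse=True)[n - 1]
-- ===== Notes on version B (the rewrite author's own statement) =====
-- stated objective: faster
-- what changed: B sorts once in descending order and indexes the (n-1)th element instead of A's n repeated full max-scans with removal; unlike A, B does not mutate nums (the claim is about the return value only); Pre_ excludes n<=0 (A raises UnboundLocalError) and n>len(nums) (A raises IndexError).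
import Mathlib
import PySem

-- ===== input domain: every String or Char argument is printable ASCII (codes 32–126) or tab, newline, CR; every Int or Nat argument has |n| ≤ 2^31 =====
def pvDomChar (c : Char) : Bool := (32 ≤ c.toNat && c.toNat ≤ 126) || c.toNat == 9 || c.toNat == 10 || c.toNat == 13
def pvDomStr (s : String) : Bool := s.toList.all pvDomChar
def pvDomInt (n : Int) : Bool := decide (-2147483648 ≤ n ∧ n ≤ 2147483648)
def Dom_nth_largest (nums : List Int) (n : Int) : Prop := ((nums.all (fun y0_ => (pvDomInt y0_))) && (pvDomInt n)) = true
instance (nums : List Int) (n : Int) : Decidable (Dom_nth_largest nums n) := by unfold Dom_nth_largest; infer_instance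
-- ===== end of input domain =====

-- B replaces A's n repeated max-scan-and-remove passes by one descending sort indexed at n-1
-- (A destructively removes the n largest from the caller's nums; B does not mutate nums — the
-- theorems are about the return value only).


-- ===== PORT A =====
-- one iteration of A's loop body: max_num = nums[0]; scan for the max; nums.remove(max_num).
-- state = some (nums, last max_num); none = a raised IndexError/ValueError (outside Pre_).
def stepA (st : Option (List Int × Int)) : Option (List Int × Int) :=
  match st with
  | none => none
  | some (xs, _) =>
    match PySem.List.pyGet? xs 0 with
    | none => none
    | some h0 =>
      let m := xs.foldl (fun mx v => if v > mx then v else mx) h0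
      match PySem.List.remove? xs m with
      | none => none
      | some xs' => some (xs', m)

def nth_largest (nums : List Int) (n : Int) : Int :=
  -- initial 0 stands for the unbound max_num: with n ≤ 0 Python raises UnboundLocalError (outside Pre_)
  match (PySem.List.pyRange 0 n 1).foldl (fun st _ => stepA st) (some (nums, 0)) with
  | some (_, m) => m
  | none => 0

-- ===== PORT B =====
def nth_largest_alt (nums : List Int) (n : Int) : Int :=
  -- sorted(nums, reverse=True)[n-1]; none = IndexError, outside Pre_
  (PySem.List.pyGet? (PySem.List.sorted nums (fun x => x) true) (n - 1)).getD 0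

-- ===== PRECONDITION & SPEC =====
-- A raises UnboundLocalError when n ≤ 0 and IndexError when n > len(nums); exactly those are excluded.
def Pre_nth_largest (nums : List Int) (n : Int) : Prop := 1 ≤ n ∧ n ≤ nums.length
instance (nums : List Int) (n : Int) : Decidable (Pre_nth_largest nums n) := by unfold Pre_nth_largest; infer_instance
def pvWitness_nth_largest : List Int × Int := ([3, 1, 4, 1, 5], 2)

def Spec_nth_largest (nums : List Int) (n : Int) (out : Int) : Prop := out = nth_largest_alt nums n
instance (nums : List Int) (n : Int) (out : Int) : Decidable (Spec_nth_largest nums n out) := by unfold Spec_nth_largest; infer_instance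

-- ===== CLAIM (what is proved, stated in full; the proofs are below) =====
def Claim_equal_nth_largest : Prop := ∀ (nums : List Int) (n : Int), Dom_nth_largest nums n → Pre_nth_largest nums n → Spec_nth_largest nums n (nth_largest nums n)

-- ===== LEMMAS AND PROOFS =====

-- A's comparison-and-keep scan is a running max
lemma scan_eq_foldl_max (xs : List Int) (a : Int) :
    xs.foldl (fun mx v => if v > mx then v else mx) a = xs.foldl max a := by
  have h : (fun (mx v : Int) => if v > mx then v else mx) = max := by
    funext mx v
    rcases lt_or_ge mx v with h | h
    · simp [h, max_eq_right h.le]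
    · simp [not_lt.mpr h, max_eq_left h]
  rw [h]

-- a fold whose body ignores the list elements is an iterate
lemma foldl_const_iterate {α β : Type} (f : α → α) (l : List β) (init : α) :
    l.foldl (fun st _ => f st) init = f^[l.length] init := by
  induction l generalizing init with
  | nil => rfl
  | cons x t ih => simp [List.foldl, ih, Function.iterate_succ_apply]

-- the head of a descending sort is the maximum, and the tail sorts the rest
lemma sortedDesc_cons_max (xs : List Int) (m : Int) (hm : m ∈ xs) (hmax : ∀ y ∈ xs, y ≤ m) :
    PySem.List.sorted xs (fun x => x) true = m :: PySem.List.sorted (xs.erase m) (fun x => x) true := by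
  apply PySem.List.eq_of_perm_of_pairwise_le_of_injective (fun x : Int => -x) neg_injective
  · exact ((PySem.List.sorted_perm xs (fun x => x) true).trans (List.perm_cons_erase hm)).trans
      ((PySem.List.sorted_perm (xs.erase m) (fun x => x) true).symm.cons m)
  · exact (PySem.List.sorted_pairwise_rev xs (fun x => x)).imp (fun h => by omega)
  · refine List.Pairwise.cons ?_ ((PySem.List.sorted_pairwise_rev (xs.erase m) (fun x => x)).imp (fun h => by omega))
    intro b hb
    have : b ∈ xs.erase m := (PySem.List.mem_sorted _ _ _ _).mp hb
    have := hmax b (List.mem_of_mem_erase this)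
    omega

lemma stepA_some (h : Int) (t : List Int) (prev : Int) :
    stepA (some (h :: t, prev)) =
      some ((h :: t).erase (t.foldl max h), t.foldl max h) := by
  have hmem : t.foldl max h ∈ h :: t := by
    rcases PySem.List.foldl_max_mem t h with h1 | h1
    · rw [h1]; exact List.mem_cons_self
    · exact List.mem_cons_of_mem _ h1
  have hs : (h :: t).foldl (fun mx v => if v > mx then v else mx) h = t.foldl max h := by
    rw [scan_eq_foldl_max]; simp
  simp only [stepA, PySem.List.pyGet?_zero_cons, hs, PySem.List.remove?_eq_some_erase _ _ hmem]

-- A's loop after k+1 iterations returns the (k)-th element of the descending sort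
lemma stepA_iter : ∀ (k : Nat) (xs : List Int) (prev : Int), k < xs.length →
    ∃ ys, stepA^[k + 1] (some (xs, prev)) =
      some (ys, (PySem.List.sorted xs (fun x => x) true).getD k 0) := by
  intro k
  induction k with
  | zero =>
    intro xs prev hlen
    match xs with
    | h :: t =>
      have hmem : t.foldl max h ∈ h :: t := by
        rcases PySem.List.foldl_max_mem t h with h1 | h1
        · rw [h1]; exact List.mem_cons_self
        · exact List.mem_cons_of_mem _ h1
      have hmax : ∀ y ∈ h :: t, y ≤ t.foldl max h := by
        intro y hy
        rcases List.mem_cons.mp hy with rfl | hy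
        · exact (PySem.List.le_foldl_max t y).1
        · exact (PySem.List.le_foldl_max t h).2 y hy
      refine ⟨(h :: t).erase (t.foldl max h), ?_⟩
      rw [Function.iterate_one, stepA_some, sortedDesc_cons_max (h :: t) (t.foldl max h) hmem hmax,
        List.getD_cons_zero]
  | succ k ih =>
    intro xs prev hlen
    match xs with
    | h :: t =>
      have hmem : t.foldl max h ∈ h :: t := by
        rcases PySem.List.foldl_max_mem t h with h1 | h1
        · rw [h1]; exact List.mem_cons_self
        · exact List.mem_cons_of_mem _ h1
      have hmax : ∀ y ∈ h :: t, y ≤ t.foldl max h := by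
        intro y hy
        rcases List.mem_cons.mp hy with rfl | hy
        · exact (PySem.List.le_foldl_max t y).1
        · exact (PySem.List.le_foldl_max t h).2 y hy
      have hlen' : k < ((h :: t).erase (t.foldl max h)).length := by
        rw [List.length_erase_of_mem hmem]
        simp only [List.length_cons] at hlen ⊢
        omega
      obtain ⟨ys, hys⟩ := ih ((h :: t).erase (t.foldl max h)) (t.foldl max h) hlen'
      refine ⟨ys, ?_⟩
      rw [show k + 1 + 1 = (k + 1) + 1 from rfl, Function.iterate_succ_apply, stepA_some, hys,
        sortedDesc_cons_max (h :: t) (t.foldl max h) hmem hmax]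
      rfl

-- ===== VERDICT (by name: the statement is the Claim_ definition above) =====
theorem nth_largest_spec : Claim_equal_nth_largest := by
  intro nums n _ hpre
  obtain ⟨h1, h2⟩ := hpre
  unfold Spec_nth_largest nth_largest nth_largest_alt
  obtain ⟨k, hk⟩ : ∃ k : Nat, n.toNat = k + 1 := ⟨n.toNat - 1, by omega⟩
  have hklen : k < nums.length := by omega
  obtain ⟨ys, hys⟩ := stepA_iter k nums 0 hklen
  rw [foldl_const_iterate, PySem.List.length_pyRange_one]
  simp only [Int.sub_zero, hk, hys]
  have hk2 : (n - 1).toNat = k := by omega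
  have hlt : k < (PySem.List.sorted nums (fun x => x) true).length := by
    rw [PySem.List.length_sorted]; omega
  rw [PySem.List.pyGet?_of_nonneg (PySem.List.sorted nums (fun x => x) true) (i := n - 1) (by omega), hk2, List.getElem?_eq_getElem hlt,
    List.getD_eq_getElem _ _ hlt, Option.getD_some]
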